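-- pv_equiv track=rewrite | github.com/karina-vetlugina/harmonia | aruco/key_detector.py | build_note_labels
-- ===== SOURCE A (Python) =====
-- WHITE_NOTE_PATTERN = ["C", "D", "E", "F", "G", "A", "B"]
--
-- def build_note_labels(count: int, first_white_note: str, first_octave: int) -> list[str]:
--     first_white_note = first_white_note.upper()
--     if first_white_note not in WHITE_NOTE_PATTERN:
--         first_white_note = "C"
--
--     note_idx = WHITE_NOTE_PATTERN.index(first_white_note)
--     octave = first_octave
--     labels = []
--
--     for _ in range(count):
--         note = WHITE_NOTE_PATTERN[note_idx]
--         labels.append(f"{note}{octave}")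
--         note_idx = (note_idx + 1) % len(WHITE_NOTE_PATTERN)
--         if note == "B":
--             octave += 1
--
--     return labels
-- ===== SOURCE B (Python) =====
-- WHITE_NOTE_PATTERN = ["C", "D", "E", "F", "G", "A", "B"]
--
-- def build_note_labels(count: int, first_white_note: str, first_octave: int) -> list[str]:
--     first_white_note = first_white_note.upper()
--     if first_white_note not in WHITE_NOTE_PATTERN:
--         first_white_note = "C"
--     start = WHITE_NOTE_PATTERN.index(first_white_note)
--     return [
--         f"{WHITE_NOTE_PATTERN[(start + i) % 7]}{first_octave + (start + i) // 7}"
--         for i in range(count)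
--     ]
-- ===== Notes on version B (the rewrite author's own statement) =====
-- stated objective: simpler
-- what changed: Replaced the stateful loop threading note_idx/octave/labels (with a conditional octave increment after 'B') by a stateless comprehension computing each label in closed form from its absolute position: note = pattern[(start+i) % 7], octave = first_octave + (start+i) // 7.
import Mathlib
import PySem

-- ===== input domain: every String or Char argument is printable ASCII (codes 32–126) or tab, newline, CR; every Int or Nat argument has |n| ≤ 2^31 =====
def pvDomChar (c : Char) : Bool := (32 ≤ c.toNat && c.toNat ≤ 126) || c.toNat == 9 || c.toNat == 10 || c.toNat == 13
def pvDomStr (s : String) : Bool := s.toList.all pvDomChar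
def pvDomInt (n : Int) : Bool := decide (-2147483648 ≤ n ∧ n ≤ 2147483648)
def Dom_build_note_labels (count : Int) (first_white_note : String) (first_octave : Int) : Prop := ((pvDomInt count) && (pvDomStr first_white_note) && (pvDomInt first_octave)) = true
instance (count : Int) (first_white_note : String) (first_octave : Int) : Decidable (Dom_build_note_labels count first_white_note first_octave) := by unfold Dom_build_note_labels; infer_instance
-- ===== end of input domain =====

-- B replaces A's stateful loop (running note index, conditional octave bump after "B")
-- by a closed-form per-element computation from the absolute position; objective: simpler.

-- ===== PORT A =====
def WHITE_NOTE_PATTERN : List String := ["C", "D", "E", "F", "G", "A", "B"]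

-- the loop 'for _ in range(count)' with state (note_idx, octave, labels); note_idx stays in 0..6
def pvLoopA : Nat → Int → Int → List String → List String
  | 0, _, _, labels => labels
  | n + 1, note_idx, octave, labels =>
      let note := PySem.List.pyGetD WHITE_NOTE_PATTERN note_idx ""
      let labels := labels ++ [note ++ PySem.Int.toStr octave]
      let note_idx := PySem.Int.mod (note_idx + 1) (WHITE_NOTE_PATTERN.length : Int)
      let octave := if note = "B" then octave + 1 else octave
      pvLoopA n note_idx octave labels

def build_note_labels (count : Int) (first_white_note : String) (first_octave : Int) : List String :=
  let fwn := PySem.Str.upper first_white_note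
  let fwn := if fwn ∈ WHITE_NOTE_PATTERN then fwn else "C"
  -- list.index: fwn is guaranteed to be a member here, so the default is never used
  let note_idx : Int := ((PySem.List.index? WHITE_NOTE_PATTERN fwn).getD 0 : Nat)
  pvLoopA count.toNat note_idx first_octave []

-- ===== PORT B =====
def build_note_labels_alt (count : Int) (first_white_note : String) (first_octave : Int) : List String :=
  let fwn := PySem.Str.upper first_white_note
  let fwn := if fwn ∈ WHITE_NOTE_PATTERN then fwn else "C"
  let start : Int := ((PySem.List.index? WHITE_NOTE_PATTERN fwn).getD 0 : Nat)
  (PySem.List.pyRange 0 count 1).map (fun i =>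
    PySem.List.pyGetD WHITE_NOTE_PATTERN (PySem.Int.mod (start + i) 7) ""
      ++ PySem.Int.toStr (first_octave + PySem.Int.floordiv (start + i) 7))

-- ===== PRECONDITION & SPEC =====
def Spec_build_note_labels (count : Int) (first_white_note : String) (first_octave : Int) (out : List String) : Prop := out = build_note_labels_alt count first_white_note first_octave
instance (count : Int) (first_white_note : String) (first_octave : Int) (out : List String) : Decidable (Spec_build_note_labels count first_white_note first_octave out) := by unfold Spec_build_note_labels; infer_instance

-- ===== CLAIM (what is proved, stated in full; the proofs are below) =====
def Claim_equal_build_note_labels : Prop := ∀ (count : Int) (first_white_note : String) (first_octave : Int), Dom_build_note_labels count first_white_note first_octave → Spec_build_note_labels count first_white_note first_octave (build_note_labels count first_white_note first_octave)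

-- ===== LEMMAS AND PROOFS =====

-- the label B computes at absolute position j with octave base o
def pvLab (j o : Int) : String :=
  PySem.List.pyGetD WHITE_NOTE_PATTERN (PySem.Int.mod j 7) ""
    ++ PySem.Int.toStr (o + PySem.Int.floordiv j 7)

lemma pvLab_shift7 (j o : Int) : pvLab (7 + j) o = pvLab j (o + 1) := by
  unfold pvLab
  rw [PySem.Int.mod_eq_emod_of_pos (by norm_num), PySem.Int.mod_eq_emod_of_pos (by norm_num),
      PySem.Int.floordiv_eq_ediv_of_pos (by norm_num), PySem.Int.floordiv_eq_ediv_of_pos (by norm_num)]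
  have h1 : (7 + j) % 7 = j % 7 := by omega
  have h2 : o + (7 + j) / 7 = o + 1 + j / 7 := by omega
  rw [h1, h2]

lemma pvLab_small (j o : Int) (h0 : 0 ≤ j) (h7 : j < 7) :
    pvLab j o = PySem.List.pyGetD WHITE_NOTE_PATTERN j "" ++ PySem.Int.toStr o := by
  unfold pvLab
  rw [PySem.Int.mod_eq_emod_of_pos (by norm_num), PySem.Int.floordiv_eq_ediv_of_pos (by norm_num)]
  have h1 : j % 7 = j := by omega
  have h2 : o + j / 7 = o := by omega
  rw [h1, h2]

lemma pvLoopA_eq (n : Nat) : ∀ (j o : Int) (labels : List String), 0 ≤ j → j < 7 →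
    pvLoopA n j o labels = labels ++ (List.range n).map (fun (i : Nat) => pvLab (j + (i : Int)) o) := by
  induction n with
  | zero => intro j o labels _ _; simp [pvLoopA]
  | succ n ih =>
    intro j o labels hj0 hj7
    rw [pvLoopA]
    by_cases h6 : j = 6
    · subst h6
      have hnote : PySem.List.pyGetD WHITE_NOTE_PATTERN (6 : Int) "" = "B" := by decide
      have hmod6 : PySem.Int.mod ((6:Int) + 1) (WHITE_NOTE_PATTERN.length : Int) = 0 := by decide
      rw [hnote, hmod6, if_pos rfl]
      rw [ih 0 (o + 1) _ le_rfl (by norm_num)]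
      rw [List.range_succ_eq_map, List.map_cons, List.map_map, List.append_assoc,
          List.singleton_append]
      congr 1
      congr 1
      · rw [show ((6:Int) + ((0:Nat):Int)) = 6 by norm_num]
        rw [pvLab_small 6 o (by norm_num) (by norm_num)]
        rfl
      · apply List.map_congr_left
        intro i _
        show pvLab (0 + (i : Int)) (o + 1) = pvLab (6 + ((i + 1 : Nat) : Int)) o
        rw [show (6 + ((i + 1 : Nat) : Int)) = 7 + (0 + (i : Int)) by push_cast; ring]
        rw [pvLab_shift7]
    · have hmod : PySem.Int.mod (j + 1) (WHITE_NOTE_PATTERN.length : Int) = j + 1 := by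
        rw [show (WHITE_NOTE_PATTERN.length : Int) = 7 from rfl,
            PySem.Int.mod_eq_emod_of_pos (by norm_num)]
        omega
      have hnoteB : PySem.List.pyGetD WHITE_NOTE_PATTERN j "" ≠ "B" := by
        have hj6 : j < 6 := by omega
        interval_cases j <;> decide
      rw [hmod, if_neg hnoteB]
      rw [ih (j + 1) o _ (by omega) (by omega)]
      rw [List.range_succ_eq_map, List.map_cons, List.map_map, List.append_assoc,
          List.singleton_append]
      congr 1
      congr 1
      · rw [show (j + ((0:Nat):Int)) = j by norm_num]
        rw [pvLab_small j o hj0 hj7]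
      · apply List.map_congr_left
        intro i _
        show pvLab (j + 1 + (i : Int)) o = pvLab (j + ((i + 1 : Nat) : Int)) o
        congr 1
        push_cast; ring

lemma pvAlt_map_eq (count : Int) (s fo : Int) :
    (PySem.List.pyRange 0 count 1).map (fun i =>
      PySem.List.pyGetD WHITE_NOTE_PATTERN (PySem.Int.mod (s + i) 7) ""
        ++ PySem.Int.toStr (fo + PySem.Int.floordiv (s + i) 7))
    = (List.range count.toNat).map (fun (i : Nat) => pvLab (s + (i : Int)) fo) := by
  rw [PySem.List.pyRange_one, List.map_map]
  rw [show (count - 0).toNat = count.toNat by omega]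
  apply List.map_congr_left
  intro k _
  show PySem.List.pyGetD WHITE_NOTE_PATTERN (PySem.Int.mod (s + (0 + (k:Int))) 7) ""
        ++ PySem.Int.toStr (fo + PySem.Int.floordiv (s + (0 + (k:Int))) 7)
      = pvLab (s + (k:Int)) fo
  rw [show (s + (0 + (k:Int))) = s + (k:Int) by ring]
  rfl

lemma pvFinal_eq (count fo : Int) (v : String) (hv : v ∈ WHITE_NOTE_PATTERN) :
    pvLoopA count.toNat (((PySem.List.index? WHITE_NOTE_PATTERN v).getD 0 : Nat) : Int) fo []
    = (PySem.List.pyRange 0 count 1).map (fun i =>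
        PySem.List.pyGetD WHITE_NOTE_PATTERN
          (PySem.Int.mod ((((PySem.List.index? WHITE_NOTE_PATTERN v).getD 0 : Nat) : Int) + i) 7) ""
          ++ PySem.Int.toStr (fo
              + PySem.Int.floordiv ((((PySem.List.index? WHITE_NOTE_PATTERN v).getD 0 : Nat) : Int) + i) 7)) := by
  have hs7 : (PySem.List.index? WHITE_NOTE_PATTERN v).getD 0 < 7 := by
    fin_cases hv <;> decide
  rw [pvLoopA_eq count.toNat _ fo [] (Int.natCast_nonneg _) (by exact_mod_cast hs7)]
  rw [pvAlt_map_eq]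
  simp

-- ===== VERDICT (by name: the statement is the Claim_ definition above) =====
theorem build_note_labels_spec : Claim_equal_build_note_labels := by
  intro count fwn fo _
  unfold Spec_build_note_labels
  simp only [build_note_labels, build_note_labels_alt]
  apply pvFinal_eq
  split_ifs with h
  · exact h
  · decide
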